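-- pv_equiv track=rewrite | github.com/markoinla/gcp-doc-pipeline | functions/pdf-vision-pipeline/result_aggregator.py | calculate_pattern_counts
-- ===== SOURCE A (Python) =====
-- from collections import defaultdict
--
-- def calculate_pattern_counts(patterns):
--     """Calculate pattern counts by text content"""
--     if not patterns:
--         return {}
--
--     counts = defaultdict(int)
--     for pattern in patterns:
--         # Group by text content instead of pattern_type
--         text = pattern['text'].strip()
--         counts[text] += 1
--
--     return dict(counts)
-- ===== SOURCE B (Python) =====
-- def calculate_pattern_counts(patterns):
--     """Calculate pattern counts by text content"""
--     texts = [p['text'].strip() for p in patterns]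
--     result = {}
--     for t in texts:
--         if t not in result:
--             result[t] = texts.count(t)
--     return result
-- ===== Notes on version B (the rewrite author's own statement) =====
-- stated objective: alternative
-- what changed: B replaces A's incremental defaultdict accumulation with a two-pass scheme: it first materialises the list of stripped texts, then builds the result by recording, at each text's first occurrence, its total count obtained from list.count.
import Mathlib
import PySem

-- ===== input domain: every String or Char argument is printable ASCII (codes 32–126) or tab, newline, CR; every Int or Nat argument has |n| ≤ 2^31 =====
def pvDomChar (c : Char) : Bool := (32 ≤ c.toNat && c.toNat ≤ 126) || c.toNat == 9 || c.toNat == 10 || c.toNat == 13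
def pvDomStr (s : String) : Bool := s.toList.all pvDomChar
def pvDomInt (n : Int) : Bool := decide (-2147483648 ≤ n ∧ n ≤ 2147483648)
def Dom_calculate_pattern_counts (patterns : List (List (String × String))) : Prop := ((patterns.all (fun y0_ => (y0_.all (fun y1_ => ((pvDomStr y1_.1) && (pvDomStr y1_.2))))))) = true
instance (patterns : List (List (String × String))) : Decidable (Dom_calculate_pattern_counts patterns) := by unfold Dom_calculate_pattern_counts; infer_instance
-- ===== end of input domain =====

-- ===== PORT A =====
-- Header: B computes the same counts dict by a two-pass first-occurrence/count scheme instead of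
-- A's incremental defaultdict accumulation (objective: alternative decomposition, same result).
def calculate_pattern_counts (patterns : List (List (String × String))) : List (String × Int) :=
  if patterns = [] then []
  else
    (patterns.foldl (fun counts pattern =>
        let text := PySem.Str.strip (((PySem.Dict.mk pattern).get? "text").getD "")
        counts.insert text (counts.getD text 0 + 1))
      PySem.Dict.empty).items

-- ===== PORT B =====
def calculate_pattern_counts_alt (patterns : List (List (String × String))) : List (String × Int) :=
  let texts := patterns.map (fun p => PySem.Str.strip (((PySem.Dict.mk p).get? "text").getD ""))
  (texts.foldl (fun result t =>
      if result.contains t then result else result.insert t ((texts.count t : Int)))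
    PySem.Dict.empty).items

-- ===== PRECONDITION & SPEC =====
-- Pre_ excludes exactly the inputs where some pattern dict has no 'text' key: there Python A
-- (and Python B alike) raises KeyError.
def Pre_calculate_pattern_counts (patterns : List (List (String × String))) : Prop :=
  ∀ p ∈ patterns, ((PySem.Dict.mk p).get? "text").isSome = true
instance (patterns : List (List (String × String))) : Decidable (Pre_calculate_pattern_counts patterns) := by unfold Pre_calculate_pattern_counts; infer_instance
def pvWitness_calculate_pattern_counts : (List (List (String × String))) :=
  [[("text", " a ")], [("text", "a"), ("kind", "x")], [("text", "b")]]
def Spec_calculate_pattern_counts (patterns : List (List (String × String))) (out : List (String × Int)) : Prop := out = calculate_pattern_counts_alt patterns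
instance (patterns : List (List (String × String))) (out : List (String × Int)) : Decidable (Spec_calculate_pattern_counts patterns out) := by unfold Spec_calculate_pattern_counts; infer_instance

-- ===== CLAIM (what is proved, stated in full; the proofs are below) =====
def Claim_equal_calculate_pattern_counts : Prop := ∀ (patterns : List (List (String × String))), Dom_calculate_pattern_counts patterns → Pre_calculate_pattern_counts patterns → Spec_calculate_pattern_counts patterns (calculate_pattern_counts patterns)

-- ===== LEMMAS AND PROOFS =====

-- B's guarded-insert loop: starting from a dict whose items are the keys S paired through g,
-- it extends the key list exactly as Python's `if t not in result` / Set.add does.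
theorem alt_loop_inv (g : String → Int) (l : List String) : ∀ (S : List String),
    ((l.foldl (fun r t => if r.contains t then r else r.insert t (g t))
        (PySem.Dict.mk (S.map (fun k => (k, g k))))).items)
    = (l.foldl PySem.Set.add S).map (fun k => (k, g k)) := by
  induction l with
  | nil => intro S; rfl
  | cons x l ih =>
    intro S
    have hc : (PySem.Dict.mk (S.map (fun k => (k, g k)))).contains x = S.contains x := by
      rw [PySem.Dict.contains_mk]
      simp [List.any_map, Function.comp_def, List.any_beq']
    by_cases hx : S.contains x = true
    · simp only [List.foldl_cons, hc, hx, if_pos, PySem.Set.add, PySem.Set.contains]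
      exact ih S
    · have hx' : S.contains x = false := by simpa using hx
      have hins : (PySem.Dict.mk (S.map (fun k => (k, g k)))).insert x (g x)
          = PySem.Dict.mk ((S ++ [x]).map (fun k => (k, g k))) := by
        apply PySem.Dict.ext
        rw [PySem.Dict.items_insert_of_not_contains _ _ (by rw [hc]; exact hx')]
        simp
      simp only [List.foldl_cons, hc, hx', Bool.false_eq_true, if_false, hins,
        PySem.Set.add, PySem.Set.contains]
      exact ih (S ++ [x])

-- A's accumulation loop is collections.Counter (cited from the prelude).
theorem calc_A_items (texts : List String) :
    (texts.foldl (fun d t => d.insert t (d.getD t 0 + 1)) PySem.Dict.empty).items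
    = (PySem.Set.ofList texts).map (fun k => (k, (texts.count k : Int))) := by
  rw [PySem.Dict.foldl_insert_getD_add_one_eq_counter, PySem.Dict.items_counter]

-- ===== VERDICT (by name: the statement is the Claim_ definition above) =====
theorem calculate_pattern_counts_spec : Claim_equal_calculate_pattern_counts := by
  intro patterns _ _
  unfold Spec_calculate_pattern_counts calculate_pattern_counts calculate_pattern_counts_alt
  by_cases hp : patterns = []
  · subst hp; rfl
  · rw [if_neg hp]
    show (patterns.foldl (fun counts pattern =>
        counts.insert (PySem.Str.strip (((PySem.Dict.mk pattern).get? "text").getD ""))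
          ((counts.getD (PySem.Str.strip (((PySem.Dict.mk pattern).get? "text").getD "")) 0) + 1))
        PySem.Dict.empty).items
      = ((patterns.map (fun p => PySem.Str.strip (((PySem.Dict.mk p).get? "text").getD ""))).foldl
          (fun result t => if result.contains t then result
            else result.insert t
              (((patterns.map (fun p => PySem.Str.strip (((PySem.Dict.mk p).get? "text").getD ""))).count t : Int)))
          PySem.Dict.empty).items
    rw [show (patterns.foldl (fun counts pattern =>
        counts.insert (PySem.Str.strip (((PySem.Dict.mk pattern).get? "text").getD ""))
          ((counts.getD (PySem.Str.strip (((PySem.Dict.mk pattern).get? "text").getD "")) 0) + 1))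
        (PySem.Dict.empty : PySem.Dict String Int))
      = ((patterns.map (fun p => PySem.Str.strip (((PySem.Dict.mk p).get? "text").getD ""))).foldl
          (fun d t => d.insert t (d.getD t 0 + 1)) (PySem.Dict.empty : PySem.Dict String Int))
      from (List.foldl_map
        (f := fun p => PySem.Str.strip (((PySem.Dict.mk p).get? "text").getD ""))
        (g := fun (d : PySem.Dict String Int) t => d.insert t (d.getD t 0 + 1))
        (l := patterns) (init := PySem.Dict.empty)).symm]
    rw [calc_A_items]
    have hB := alt_loop_inv
      (fun t => (((patterns.map (fun p => PySem.Str.strip (((PySem.Dict.mk p).get? "text").getD ""))).count t : Int)))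
      (patterns.map (fun p => PySem.Str.strip (((PySem.Dict.mk p).get? "text").getD ""))) []
    simp only [List.map_nil] at hB
    rw [PySem.Set.ofList_eq_foldl, ← hB]
    rfl
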